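-- pv_equiv track=rewrite | github.com/pharmaDB/scoring_data_processor | generate_files.py | group_label_docs_by_set_id
-- ===== SOURCE A (Python) =====
-- from itertools import groupby
--
-- def group_label_docs_by_set_id(docs):
--     """
--     This function groups the docs by 'set_id" and returns a list of list,
--     wherein the inner list share the same set_id.
--
--     Return example:
--         [[{set_id:X,},{set_id:X,}],[{set_id:Y,},{set_id:Y,}],]
--
--     Parameters:
--         docs (list): list of label docs from MongoDB having the same
--                      application_numbers
--     """
--
--     def key_func(k):
--         return k["set_id"]
--
--     docs = sorted(
--         docs,
--         key=key_func,
--         reverse=False,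
--     )
--     return_list = [list(value) for key, value in groupby(docs, key=key_func)]
--     return return_list
-- ===== SOURCE B (Python) =====
-- def group_label_docs_by_set_id(docs):
--     groups = {}
--     for doc in docs:
--         groups.setdefault(doc["set_id"], []).append(doc)
--     return [groups[k] for k in sorted(groups)]
-- ===== Notes on version B (the rewrite author's own statement) =====
-- stated objective: alternative
-- what changed: B replaces sort-whole-list-then-itertools.groupby with a single pass building a dict from set_id to its docs (encounter order) and then sorting only the distinct keys.
import Mathlib
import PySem

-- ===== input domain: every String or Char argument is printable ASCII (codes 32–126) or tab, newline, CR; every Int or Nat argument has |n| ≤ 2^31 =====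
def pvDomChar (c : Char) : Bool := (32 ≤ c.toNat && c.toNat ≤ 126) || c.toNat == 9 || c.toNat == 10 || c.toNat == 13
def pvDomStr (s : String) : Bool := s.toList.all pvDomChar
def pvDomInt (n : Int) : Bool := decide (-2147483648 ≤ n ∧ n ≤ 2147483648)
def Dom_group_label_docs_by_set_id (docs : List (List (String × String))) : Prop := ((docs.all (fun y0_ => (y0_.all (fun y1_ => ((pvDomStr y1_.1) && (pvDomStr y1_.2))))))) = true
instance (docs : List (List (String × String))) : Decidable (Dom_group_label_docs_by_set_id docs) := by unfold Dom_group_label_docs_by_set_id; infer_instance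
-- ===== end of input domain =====

-- B groups docs into a set_id-indexed dict in one pass and sorts only the distinct keys,
-- instead of A's sort-the-whole-list-then-groupby; equivalence is about the return value.

-- ===== PORT A =====
-- key_func(k) = k["set_id"]; total via a default, exact under Pre_ (every doc carries the key)
def pvKey (doc : List (String × String)) : String :=
  (PySem.Dict.mk doc).getD "set_id" ""

-- [list(value) for key, value in groupby(docs, key=key_func)] : maximal runs of equal keys,
-- as the obvious structural recursion (merge x into the first run when its key matches)
def pvGroupRuns : List (List (String × String)) → List (List (List (String × String)))
  | [] => []
  | x :: rest =>
    match pvGroupRuns rest with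
    | [] => [[x]]
    | [] :: rs => [x] :: rs
    | (y :: r) :: rs =>
      if pvKey x == pvKey y then (x :: y :: r) :: rs else [x] :: (y :: r) :: rs

def group_label_docs_by_set_id (docs : List (List (String × String))) : List (List (List (String × String))) :=
  let sortedDocs := PySem.List.sorted docs pvKey false
  pvGroupRuns sortedDocs

-- ===== PORT B =====
def group_label_docs_by_set_id_alt (docs : List (List (String × String))) : List (List (List (String × String))) :=
  let groups := docs.foldl (fun g doc => g.modify (pvKey doc) [] (fun v => v ++ [doc])) PySem.Dict.empty
  (PySem.List.sorted groups.keys (fun k => k) false).map (fun k => groups.getD k [])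

-- ===== PRECONDITION & SPEC =====
-- Pre_ excludes exactly the docs lists with a doc lacking the "set_id" key, on which A raises KeyError.
def Pre_group_label_docs_by_set_id (docs : List (List (String × String))) : Prop :=
  (docs.all (fun doc => (PySem.Dict.mk doc).contains "set_id")) = true
instance (docs : List (List (String × String))) : Decidable (Pre_group_label_docs_by_set_id docs) := by unfold Pre_group_label_docs_by_set_id; infer_instance
def pvWitness_group_label_docs_by_set_id : (List (List (String × String))) :=
  [[("set_id", "b"), ("name", "n1")], [("set_id", "a")], [("set_id", "b"), ("name", "n2")]]

def Spec_group_label_docs_by_set_id (docs : List (List (String × String))) (out : List (List (List (String × String)))) : Prop := out = group_label_docs_by_set_id_alt docs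
instance (docs : List (List (String × String))) (out : List (List (List (String × String)))) : Decidable (Spec_group_label_docs_by_set_id docs out) := by unfold Spec_group_label_docs_by_set_id; infer_instance

-- ===== CLAIM (what is proved, stated in full; the proofs are below) =====
def Claim_equal_group_label_docs_by_set_id : Prop := ∀ (docs : List (List (String × String))), Dom_group_label_docs_by_set_id docs → Pre_group_label_docs_by_set_id docs → Spec_group_label_docs_by_set_id docs (group_label_docs_by_set_id docs)

-- ===== LEMMAS AND PROOFS =====

-- the common normal form: sorted distinct keys, original-order group per key
def pvGrp (ds : List (List (String × String))) (k : String) : List (List (String × String)) :=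
  ds.filter (fun d => pvKey d == k)

def pvSKeys (ds : List (List (String × String))) : List String :=
  PySem.List.sorted (PySem.Set.ofList (ds.map pvKey)) (fun k => k) false

theorem pvInsertBy_cons {α : Type} (b : α → α → Bool) (x y : α) (ys : List α) :
    PySem.List.insertBy b x (y :: ys) = if b x y then x :: y :: ys else y :: PySem.List.insertBy b x ys := rfl

theorem pvInsertBy_all_true {α : Type} (b : α → α → Bool) (x : α) (l : List α)
    (h : ∀ y ∈ l, b x y = true) : PySem.List.insertBy b x l = x :: l := by
  cases l with
  | nil => rfl
  | cons y ys => rw [pvInsertBy_cons, h y (List.mem_cons_self)]; rfl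

theorem pvInsertBy_append_not {α : Type} (b : α → α → Bool) (x : α) (l1 l2 : List α)
    (h : ∀ y ∈ l1, b x y = false) :
    PySem.List.insertBy b x (l1 ++ l2) = l1 ++ PySem.List.insertBy b x l2 := by
  induction l1 with
  | nil => simp
  | cons y t ih =>
      rw [List.cons_append, pvInsertBy_cons, h y (List.mem_cons_self)]
      simp only [if_neg Bool.false_ne_true]
      rw [ih (fun z hz => h z (List.mem_cons_of_mem _ hz))]
      rfl

theorem pvFlatMap_congr {α β : Type} (l : List α) (f g : α → List β)
    (h : ∀ a ∈ l, f a = g a) : l.flatMap f = l.flatMap g := by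
  induction l with
  | nil => rfl
  | cons a t ih =>
      simp only [List.flatMap_cons, h a (List.mem_cons_self),
        ih (fun z hz => h z (List.mem_cons_of_mem _ hz))]

theorem pvSplit_lt (S : List String) (c : String) (hp : S.Pairwise (· < ·)) (hnm : c ∉ S) :
    ∃ S1 S2, S = S1 ++ S2 ∧ (∀ a ∈ S1, a < c) ∧ (∀ a ∈ S2, c < a) := by
  induction S with
  | nil => exact ⟨[], [], rfl, by simp, by simp⟩
  | cons s t ih =>
      rcases List.pairwise_cons.mp hp with ⟨hs, ht⟩
      by_cases h : s < c
      · obtain ⟨S1, S2, hSeq, h1, h2⟩ := ih ht (fun hm => hnm (List.mem_cons_of_mem _ hm))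
        exact ⟨s :: S1, S2, by rw [hSeq]; rfl, by
          intro a ha; rcases List.mem_cons.mp ha with rfl | ha
          · exact h
          · exact h1 a ha, h2⟩
      · have hcs : c < s := by
          rcases lt_trichotomy c s with h' | h' | h'
          · exact h'
          · exact absurd (h' ▸ List.mem_cons_self) hnm
          · exact absurd h' h
        refine ⟨[], s :: t, rfl, by simp, ?_⟩
        intro a ha
        rcases List.mem_cons.mp ha with rfl | ha
        · exact hcs
        · exact lt_trans hcs (hs a ha)

-- inserting x into the flattened groups: its key already present
theorem pvIns_mem (S : List String) (g : String → List (List (String × String)))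
    (x : List (String × String))
    (hp : S.Pairwise (· < ·))
    (hg : ∀ k ∈ S, ∀ d ∈ g k, pvKey d = k)
    (hmem : pvKey x ∈ S) :
    PySem.List.insertBy (fun a b => decide (pvKey a < pvKey b)) x (S.flatMap g)
      = S.flatMap (fun k => if k = pvKey x then g k ++ [x] else g k) := by
  obtain ⟨S1, S2, rfl⟩ := List.append_of_mem hmem
  rcases List.pairwise_append.mp hp with ⟨hp1, hp2, hcross⟩
  rcases List.pairwise_cons.mp hp2 with ⟨h2, hp2'⟩
  have h1 : ∀ a ∈ S1, a < pvKey x := fun a ha => hcross a ha _ List.mem_cons_self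
  rw [List.flatMap_append, List.flatMap_cons, ← List.append_assoc]
  rw [pvInsertBy_append_not]
  · rw [pvInsertBy_all_true]
    · rw [List.flatMap_append, List.flatMap_cons]
      have e1 : S1.flatMap (fun k => if k = pvKey x then g k ++ [x] else g k) = S1.flatMap g := by
        apply pvFlatMap_congr; intro a ha
        rw [if_neg (ne_of_lt (h1 a ha))]
      have e2 : S2.flatMap (fun k => if k = pvKey x then g k ++ [x] else g k) = S2.flatMap g := by
        apply pvFlatMap_congr; intro a ha
        rw [if_neg (ne_of_gt (h2 a ha))]
      rw [e1, e2, if_pos rfl]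
      simp
    · intro y hy
      rcases List.mem_flatMap.mp hy with ⟨k, hk, hyk⟩
      have : pvKey y = k := hg k (List.mem_append_right _ (List.mem_cons_of_mem _ hk)) y hyk
      simp [this, h2 k hk]
  · intro y hy
    rcases List.mem_append.mp hy with hy | hy
    · rcases List.mem_flatMap.mp hy with ⟨k, hk, hyk⟩
      have : pvKey y = k := hg k (List.mem_append_left _ hk) y hyk
      simp [this, not_lt_of_gt (h1 k hk)]
    · have : pvKey y = pvKey x := hg (pvKey x) (List.mem_append_right _ List.mem_cons_self) y hy
      simp [this]

-- inserting x whose key is new: a fresh singleton group appears at the key's sorted position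
theorem pvIns_not_mem (S : List String) (g : String → List (List (String × String)))
    (x : List (String × String))
    (hp : S.Pairwise (· < ·))
    (hg : ∀ k ∈ S, ∀ d ∈ g k, pvKey d = k)
    (hnm : pvKey x ∉ S) :
    PySem.List.insertBy (fun a b => decide (pvKey a < pvKey b)) x (S.flatMap g)
      = (PySem.List.insertBy (fun a b => decide (a < b)) (pvKey x) S).flatMap
          (fun k => if k = pvKey x then [x] else g k) := by
  obtain ⟨S1, S2, rfl, h1, h2⟩ := pvSplit_lt S (pvKey x) hp hnm
  have hid : PySem.List.insertBy (fun a b => decide (a < b)) (pvKey x) (S1 ++ S2)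
      = S1 ++ pvKey x :: S2 := by
    rw [pvInsertBy_append_not _ _ _ _ (fun y hy => by simp [not_lt_of_gt (h1 y hy)])]
    rw [pvInsertBy_all_true _ _ _ (fun y hy => by simp [h2 y hy])]
  rw [hid, List.flatMap_append, List.flatMap_append, List.flatMap_cons]
  rw [pvInsertBy_append_not]
  · rw [pvInsertBy_all_true]
    · have e1 : S1.flatMap (fun k => if k = pvKey x then [x] else g k) = S1.flatMap g := by
        apply pvFlatMap_congr; intro a ha
        rw [if_neg (ne_of_lt (h1 a ha))]
      have e2 : S2.flatMap (fun k => if k = pvKey x then [x] else g k) = S2.flatMap g := by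
        apply pvFlatMap_congr; intro a ha
        rw [if_neg (ne_of_gt (h2 a ha))]
      rw [e1, e2, if_pos rfl]
      rfl
    · intro y hy
      rcases List.mem_flatMap.mp hy with ⟨k, hk, hyk⟩
      have : pvKey y = k := hg k (List.mem_append_right _ hk) y hyk
      simp [this, h2 k hk]
  · intro y hy
    rcases List.mem_flatMap.mp hy with ⟨k, hk, hyk⟩
    have : pvKey y = k := hg k (List.mem_append_left _ hk) y hyk
    simp [this, not_lt_of_gt (h1 k hk)]

theorem pvGrp_key : ∀ (ds : List (List (String × String))) (k : String),
    ∀ d ∈ pvGrp ds k, pvKey d = k := by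
  intro ds k d hd
  have := (List.mem_filter.mp hd).2
  exact eq_of_beq this

-- A's stable sort, characterised: sorted-by-key = sorted distinct keys, each key's docs in original order
theorem pvSorted_eq_flatMap (ds : List (List (String × String))) :
    PySem.List.sorted ds pvKey false = (pvSKeys ds).flatMap (pvGrp ds) := by
  induction ds using List.reverseRecOn with
  | nil => rfl
  | append_singleton ds x ih =>
      have hstep : PySem.List.sorted (ds ++ [x]) pvKey false
          = PySem.List.insertBy (fun a b => decide (pvKey a < pvKey b)) x
              (PySem.List.sorted ds pvKey false) := by
        rw [PySem.List.sorted_eq_foldl_insertBy, PySem.List.sorted_eq_foldl_insertBy,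
          List.foldl_append]
        rfl
      have hgrp : ∀ k, pvGrp (ds ++ [x]) k
          = pvGrp ds k ++ (if pvKey x = k then [x] else []) := by
        intro k
        simp only [pvGrp, List.filter_append, List.filter_cons, List.filter_nil]
        by_cases h : pvKey x = k
        · simp [h]
        · simp [h, beq_eq_false_iff_ne.mpr h]
      have hp : (pvSKeys ds).Pairwise (· < ·) := PySem.List.sorted_ofList_pairwise_lt _
      have hg : ∀ k ∈ pvSKeys ds, ∀ d ∈ pvGrp ds k, pvKey d = k := fun k _ => pvGrp_key ds k
      have hset : PySem.Set.ofList ((ds ++ [x]).map pvKey)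
          = PySem.Set.add (PySem.Set.ofList (ds.map pvKey)) (pvKey x) := by
        rw [List.map_append, PySem.Set.ofList_eq_foldl, PySem.Set.ofList_eq_foldl,
          List.foldl_append]
        rfl
      by_cases hmem : pvKey x ∈ PySem.Set.ofList (ds.map pvKey)
      · have hkeys : pvSKeys (ds ++ [x]) = pvSKeys ds := by
          unfold pvSKeys
          rw [hset]
          have : PySem.Set.add (PySem.Set.ofList (ds.map pvKey)) (pvKey x)
              = PySem.Set.ofList (ds.map pvKey) := by
            show (if (PySem.Set.ofList (ds.map pvKey)).contains (pvKey x) then _ else _) = _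
            simp [PySem.Set.contains, hmem]
          rw [this]
        have hmemS : pvKey x ∈ pvSKeys ds := by
          unfold pvSKeys
          rw [PySem.List.mem_sorted]
          exact hmem
        rw [hstep, ih, pvIns_mem _ _ _ hp hg hmemS, hkeys]
        apply pvFlatMap_congr
        intro k hk
        rw [hgrp k]
        by_cases h : k = pvKey x
        · rw [if_pos h, if_pos h.symm]
        · rw [if_neg h, if_neg (fun e : pvKey x = k => h e.symm), List.append_nil]
      · have hkeys : pvSKeys (ds ++ [x])
            = PySem.List.insertBy (fun a b => decide (a < b)) (pvKey x) (pvSKeys ds) := by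
          unfold pvSKeys
          rw [hset]
          have : PySem.Set.add (PySem.Set.ofList (ds.map pvKey)) (pvKey x)
              = PySem.Set.ofList (ds.map pvKey) ++ [pvKey x] := by
            show (if (PySem.Set.ofList (ds.map pvKey)).contains (pvKey x) then _ else _) = _
            simp [PySem.Set.contains, hmem]
          rw [this, PySem.List.sorted_eq_foldl_insertBy, PySem.List.sorted_eq_foldl_insertBy,
            List.foldl_append]
          rfl
        have hmemS : pvKey x ∉ pvSKeys ds := by
          unfold pvSKeys
          rw [PySem.List.mem_sorted]
          exact hmem
        have hempty : pvGrp ds (pvKey x) = [] := by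
          apply List.filter_eq_nil_iff.mpr
          intro d hd hbeq
          exact hmem (by
            rw [PySem.Set.mem_ofList]
            exact (eq_of_beq hbeq) ▸ List.mem_map_of_mem hd)
        rw [hstep, ih, pvIns_not_mem _ _ _ hp hg hmemS, hkeys]
        apply pvFlatMap_congr
        intro k hk
        rw [hgrp k]
        by_cases h : k = pvKey x
        · subst h
          rw [if_pos rfl, if_pos rfl, hempty, List.nil_append]
        · rw [if_neg h, if_neg (fun e : pvKey x = k => h e.symm), List.append_nil]

theorem pvGroupRuns_cons (x : List (String × String)) (rest : List (List (String × String))) :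
    pvGroupRuns (x :: rest)
      = match pvGroupRuns rest with
        | [] => [[x]]
        | [] :: rs => [x] :: rs
        | (y :: r) :: rs =>
          if pvKey x == pvKey y then (x :: y :: r) :: rs else [x] :: (y :: r) :: rs := rfl

-- groupRuns produces either nothing (empty input) or a first run starting at the input's head
theorem pvGroupRuns_shape (L : List (List (String × String))) :
    (pvGroupRuns L = [] ∧ L = []) ∨
      ∃ y r rs, pvGroupRuns L = (y :: r) :: rs ∧ L.head? = some y := by
  induction L with
  | nil => exact Or.inl ⟨rfl, rfl⟩
  | cons x t ih =>
      right
      rcases ih with ⟨h0, _⟩ | ⟨y, r, rs, h0, _⟩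
      · exact ⟨x, [], [], by rw [pvGroupRuns_cons, h0], rfl⟩
      · by_cases h : (pvKey x == pvKey y) = true
        · exact ⟨x, y :: r, rs, by rw [pvGroupRuns_cons, h0]; simp [h], rfl⟩
        · exact ⟨x, [], (y :: r) :: rs, by
            rw [pvGroupRuns_cons, h0]
            simp only [Bool.not_eq_true] at h
            simp [h], rfl⟩

theorem pvGroupRuns_run_prepend (k : String) :
    ∀ (l1 L : List (List (String × String))), l1 ≠ [] →
    (∀ d ∈ l1, pvKey d = k) →
    (∀ d, L.head? = some d → pvKey d ≠ k) →
    pvGroupRuns (l1 ++ L) = l1 :: pvGroupRuns L := by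
  intro l1
  induction l1 with
  | nil => intro L h; exact absurd rfl h
  | cons d t ih =>
      intro L _ hk hL
      cases t with
      | nil =>
          simp only [List.cons_append, List.nil_append]
          rcases pvGroupRuns_shape L with ⟨h0, hL0⟩ | ⟨y, r, rs, h0, hy⟩
          · rw [pvGroupRuns_cons, h0]
          · have hne : (pvKey d == pvKey y) = false := by
              have := hL y hy
              have hdk := hk d List.mem_cons_self
              exact beq_eq_false_iff_ne.mpr (fun e => this (e ▸ hdk))
            rw [pvGroupRuns_cons, h0]
            simp [hne]
      | cons d' t' =>
          have ihr : pvGroupRuns ((d' :: t') ++ L) = (d' :: t') :: pvGroupRuns L :=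
            ih L (by simp) (fun z hz => hk z (List.mem_cons_of_mem _ hz)) hL
          have heq : (pvKey d == pvKey d') = true := by
            rw [hk d List.mem_cons_self, hk d' (List.mem_cons_of_mem _ List.mem_cons_self)]
            exact beq_self_eq_true _
          rw [List.cons_append, pvGroupRuns_cons, ihr]
          simp [heq]

theorem pvGroupRuns_flatMap (S : List String) (g : String → List (List (String × String)))
    (hp : S.Pairwise (· < ·))
    (hg : ∀ k ∈ S, ∀ d ∈ g k, pvKey d = k)
    (hne : ∀ k ∈ S, g k ≠ []) :
    pvGroupRuns (S.flatMap g) = S.map g := by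
  induction S with
  | nil => rfl
  | cons k t ih =>
      rcases List.pairwise_cons.mp hp with ⟨hkt, hpt⟩
      rw [List.flatMap_cons]
      rw [pvGroupRuns_run_prepend k (g k) (t.flatMap g)
        (hne k List.mem_cons_self) (hg k List.mem_cons_self) ?_]
      · rw [ih hpt (fun a ha => hg a (List.mem_cons_of_mem _ ha))
          (fun a ha => hne a (List.mem_cons_of_mem _ ha))]
        rfl
      · intro d hd
        have hdm : d ∈ t.flatMap g := by
          cases hcase : t.flatMap g with
          | nil => rw [hcase] at hd; simp at hd
          | cons z zs =>
              rw [hcase] at hd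
              simp only [List.head?_cons, Option.some.injEq] at hd
              exact hd ▸ List.mem_cons_self
        rcases List.mem_flatMap.mp hdm with ⟨k', hk', hdk'⟩
        have : pvKey d = k' := hg k' (List.mem_cons_of_mem _ hk') d hdk'
        exact fun e => (ne_of_gt (hkt k' hk')) (by rw [← this, e])

-- B's dict of groups, characterised
theorem pvAlt_eq_map (docs : List (List (String × String))) :
    group_label_docs_by_set_id_alt docs = (pvSKeys docs).map (pvGrp docs) := by
  show (PySem.List.sorted (docs.foldl (fun g doc => g.modify (pvKey doc) [] (fun v => v ++ [doc])) PySem.Dict.empty).keys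
      (fun k => k) false).map
      (fun k => (docs.foldl (fun g doc => g.modify (pvKey doc) [] (fun v => v ++ [doc])) PySem.Dict.empty).getD k [])
    = (pvSKeys docs).map (pvGrp docs)
  have hkeys : (docs.foldl (fun g doc => g.modify (pvKey doc) [] (fun v => v ++ [doc]))
      PySem.Dict.empty).keys = PySem.Set.ofList (docs.map pvKey) := by
    rw [PySem.Dict.keys_foldl_modify_key docs pvKey [] (fun _ doc v => v ++ [doc])
      PySem.Dict.empty]
    rw [PySem.Set.ofList_eq_foldl]
    rfl
  have hgetD : ∀ k, (docs.foldl (fun g doc => g.modify (pvKey doc) [] (fun v => v ++ [doc]))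
      PySem.Dict.empty).getD k [] = pvGrp docs k := by
    intro k
    have hfold : docs.foldl (fun g doc => g.modify (pvKey doc) [] (fun v => v ++ [doc]))
        PySem.Dict.empty
        = (docs.map (fun doc => (pvKey doc, doc))).foldl
            (fun g p => g.modify p.1 [] (fun v => v ++ [p.2])) PySem.Dict.empty := by
      rw [List.foldl_map]
    rw [hfold, PySem.Dict.getD_foldl_modify_append]
    simp [pvGrp, PySem.Dict.getD_empty, List.filter_map, Function.comp_def]
  rw [hkeys]
  apply List.map_congr_left
  intro k hk
  exact hgetD k

-- ===== VERDICT (by name: the statement is the Claim_ definition above) =====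
theorem group_label_docs_by_set_id_spec : Claim_equal_group_label_docs_by_set_id := by
  intro docs _ _
  unfold Spec_group_label_docs_by_set_id
  show pvGroupRuns (PySem.List.sorted docs pvKey false) = group_label_docs_by_set_id_alt docs
  rw [pvSorted_eq_flatMap, pvAlt_eq_map]
  apply pvGroupRuns_flatMap
  · exact PySem.List.sorted_ofList_pairwise_lt _
  · exact fun k _ => pvGrp_key docs k
  · intro k hk
    have : k ∈ docs.map pvKey := by
      have := (PySem.List.mem_sorted _ _ _ _).mp hk
      rwa [PySem.Set.mem_ofList] at this
    rcases List.mem_map.mp this with ⟨d, hd, rfl⟩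
    have : d ∈ pvGrp docs (pvKey d) := List.mem_filter.mpr ⟨hd, beq_self_eq_true _⟩
    exact List.ne_nil_of_mem this
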